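-- pv_equiv track=rewrite | github.com/PetrPrazak/AdventOfCode | 2017/10/aoc2017_10.py | knot_hash
-- ===== SOURCE A (Python) =====
-- def rotate(ring, pos, count):
--     """ rotate partial list in ring from position pos for length count"""
--     size = len(ring)
--     for i in range(count // 2):
--         start = (pos + i) % size
--         end = (pos + count - 1 - i) % size
--         ring[end], ring[start] = ring[start], ring[end]
--
-- def knot_hash(data, size, part):
--
--     ring = list(range(size))
--     if part == 1:
--         items = [int(x) for x in data.split(',')]
--         repeat = 1
--     else:
--         assert size % 16 == 0
--         items = [ord(x) for x in list(data)] + [17, 31, 73, 47, 23]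
--         repeat = 64
--
--     skip = 0
--     pos = 0
--     for _ in range(repeat):
--         for n in items:
--             if n > 1:
--                 rotate(ring, pos, n)
--             pos = (pos + n + skip) % size
--             skip += 1
--
--     return ring
-- ===== SOURCE B (Python) =====
-- def knot_hash(data, size, part):
--     if part == 1:
--         items = [int(x) for x in data.split(',')]
--         repeat = 1
--     else:
--         assert size % 16 == 0
--         items = [ord(x) for x in list(data)] + [17, 31, 73, 47, 23]
--         repeat = 64
--     # keep the current position pinned at index 0: reverse the first n entries
--     # (wrapping like the original when n exceeds the ring), rotate the whole ring
--     # left, and undo the single accumulated rotation at the end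
--     ring = list(range(size))
--     skip = 0
--     total = 0
--     for _ in range(repeat):
--         for n in items:
--             for i in range(n // 2):
--                 a = i % size
--                 b = (n - 1 - i) % size
--                 ring[b], ring[a] = ring[a], ring[b]
--             r = (n + skip) % size
--             ring = ring[r:] + ring[:r]
--             total += r
--             skip += 1
--     t = total % size
--     return ring[size - t:] + ring[:size - t]
-- ===== Notes on version B (the rewrite author's own statement) =====
-- stated objective: alternative
-- what changed: Removes A's moving position and its modular-swap helper: B keeps the current position pinned at index 0, reverses the first n entries in that fixed frame, rotates the whole ring left by (n+skip) %% size each step while accumulating the rotation total, and undoes the single accumulated rotation once at the end.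
-- outside the precondition, e.g. on knot_hash('0,1', -3, 1): A returns [], B returns []
import Mathlib
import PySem

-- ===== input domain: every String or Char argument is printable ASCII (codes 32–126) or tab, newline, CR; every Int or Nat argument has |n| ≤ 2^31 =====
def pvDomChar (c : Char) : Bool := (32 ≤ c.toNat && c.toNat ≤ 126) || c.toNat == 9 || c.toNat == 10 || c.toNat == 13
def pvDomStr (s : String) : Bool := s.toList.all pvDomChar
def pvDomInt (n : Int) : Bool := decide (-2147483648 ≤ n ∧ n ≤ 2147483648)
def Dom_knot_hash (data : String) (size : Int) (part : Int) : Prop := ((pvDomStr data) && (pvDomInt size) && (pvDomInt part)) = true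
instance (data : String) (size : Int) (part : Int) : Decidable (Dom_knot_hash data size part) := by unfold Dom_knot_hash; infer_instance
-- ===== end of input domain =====

-- B pins the current position at index 0: it reverses the first n entries in the rotated frame,
-- rotates the whole ring left each step, and undoes the single accumulated rotation at the end,
-- instead of A's moving `pos` plus modular swap helper (alternative decomposition, same cost).


-- ===== PORT A =====
-- rotate(ring, pos, count): count//2 modular pairwise swaps (indices in range when 0 < len ring)
def pyRotate (ring : List Int) (pos count : Int) : List Int :=
  let size : Int := PySem.List.len ring
  (PySem.List.pyRange 0 (PySem.Int.floordiv count 2) 1).foldl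
    (fun r i =>
      let start := PySem.Int.mod (pos + i) size
      let stop := PySem.Int.mod (pos + count - 1 - i) size
      -- ring[end], ring[start] = ring[start], ring[end]
      let vs := PySem.List.pyGetD r start 0
      let ve := PySem.List.pyGetD r stop 0
      PySem.List.pySetD (PySem.List.pySetD r stop vs) start ve)
    ring

-- body of A's inner loop over items (state: ring, pos, skip)
def stepA (size : Int) (st : List Int × Int × Int) (n : Int) : List Int × Int × Int :=
  let ring := if 1 < n then pyRotate st.1 st.2.1 n else st.1
  (ring, PySem.Int.mod (st.2.1 + n + st.2.2) size, st.2.2 + 1)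

def knot_hash (data : String) (size : Int) (part : Int) : List Int :=
  let ring := PySem.List.pyRange 0 size 1
  let ir : List Int × Int :=
    if part = 1 then
      (((PySem.Str.split? data ",").getD []).map (fun x => (PySem.Int.ofStr? x).getD 0), 1)
    else
      -- assert size % 16 == 0  (inputs failing it are outside Pre_)
      (data.toList.map (fun c => (c.toNat : Int)) ++ [17, 31, 73, 47, 23], 64)
  let st :=
    (PySem.List.pyRange 0 ir.2 1).foldl
      (fun st _ => ir.1.foldl (stepA size) st) (ring, 0, 0)
  st.1

-- ===== PORT B =====
-- body of B's inner loop over items (state: ring, total, skip): swap-reverse the first n entries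
-- in place at position 0, then rotate the whole ring left by r
def stepB (size : Int) (st : List Int × Int × Int) (n : Int) : List Int × Int × Int :=
  let ring :=
    (PySem.List.pyRange 0 (PySem.Int.floordiv n 2) 1).foldl
      (fun r i =>
        let a := PySem.Int.mod i size
        let b := PySem.Int.mod (n - 1 - i) size
        -- ring[b], ring[a] = ring[a], ring[b]
        let va := PySem.List.pyGetD r a 0
        let vb := PySem.List.pyGetD r b 0
        PySem.List.pySetD (PySem.List.pySetD r b va) a vb)
      st.1
  let r := PySem.Int.mod (n + st.2.2) size
  let ring := PySem.List.slice ring (some r) none ++ PySem.List.slice ring none (some r)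
  (ring, st.2.1 + r, st.2.2 + 1)

def knot_hash_alt (data : String) (size : Int) (part : Int) : List Int :=
  let ring := PySem.List.pyRange 0 size 1
  let ir : List Int × Int :=
    if part = 1 then
      (((PySem.Str.split? data ",").getD []).map (fun x => (PySem.Int.ofStr? x).getD 0), 1)
    else
      (data.toList.map (fun c => (c.toNat : Int)) ++ [17, 31, 73, 47, 23], 64)
  let st :=
    (PySem.List.pyRange 0 ir.2 1).foldl
      (fun st _ => ir.1.foldl (stepB size) st) (ring, 0, 0)
  let t := PySem.Int.mod st.2.1 size
  PySem.List.slice st.1 (some (size - t)) none ++ PySem.List.slice st.1 none (some (size - t))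

-- ===== PRECONDITION & SPEC =====
-- Pre_ is exactly where A returns except one degenerate corner: A raises for size = 0
-- (modulo by len(ring) = 0), for unparsable part-1 tokens (ValueError), and for part ≠ 1 with
-- size % 16 ≠ 0 (AssertionError); Pre_ additionally excludes negative sizes, where A either
-- raises or returns a degenerate empty ring.
def Pre_knot_hash (data : String) (size : Int) (part : Int) : Prop :=
  0 < size ∧
  (if part = 1 then
     ∀ x ∈ (PySem.Str.split? data ",").getD [], (PySem.Int.ofStr? x).isSome = true
   else
     PySem.Int.mod size 16 = 0)

instance (data : String) (size : Int) (part : Int) : Decidable (Pre_knot_hash data size part) := by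
  unfold Pre_knot_hash; infer_instance

def pvWitness_knot_hash : String × Int × Int := ("2,1,4", 5, 1)

def Spec_knot_hash (data : String) (size : Int) (part : Int) (out : List Int) : Prop := out = knot_hash_alt data size part
instance (data : String) (size : Int) (part : Int) (out : List Int) : Decidable (Spec_knot_hash data size part out) := by unfold Spec_knot_hash; infer_instance

-- ===== CLAIM (what is proved, stated in full; the proofs are below) =====
def Claim_equal_knot_hash : Prop := ∀ (data : String) (size : Int) (part : Int), Dom_knot_hash data size part → Pre_knot_hash data size part → Spec_knot_hash data size part (knot_hash data size part)

-- ===== LEMMAS AND PROOFS =====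

-- Nat modular-arithmetic helpers
lemma pv_dcomp (N p x : Nat) (hp : p < N) : ((p + x) % N + N - p) % N = x % N := by
  have h1 : (p + x) % N + N - p = (p + x) % N + (N - p) := by omega
  rw [h1, Nat.mod_add_mod]
  have h2 : p + x + (N - p) = x + N := by omega
  rw [h2, Nat.add_mod_right]

lemma pv_pplus (N p m : Nat) (hp : p < N) (hm : m < N) : (p + (m + N - p) % N) % N = m := by
  have h1 : m + N - p = m + (N - p) := by omega
  rw [h1, Nat.add_mod_mod]
  have h2 : p + (m + (N - p)) = m + N := by omega
  rw [h2, Nat.add_mod_right, Nat.mod_eq_of_lt hm]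

-- injectivity of j ↦ (p + j) % N on [0, N)
lemma pv_shift_inj (N p u v : Nat) (hp : p < N) (hu : u < N) (hv : v < N)
    (h : (p + u) % N = (p + v) % N) : u = v := by
  have h1 := pv_dcomp N p u hp
  have h2 := pv_dcomp N p v hp
  rw [h] at h1
  rw [h2] at h1
  rw [Nat.mod_eq_of_lt hv, Nat.mod_eq_of_lt hu] at h1
  omega
-- the pure Nat-indexed swap both loop bodies perform
def natSwap' (r : List Int) (s e : Nat) : List Int :=
  (r.set e (r.getD s 0)).set s (r.getD e 0)

lemma length_natSwap' (r : List Int) (s e : Nat) : (natSwap' r s e).length = r.length := by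
  simp [natSwap']

-- A's rotate as a fold of Nat-indexed swaps
lemma pyRotate_eq_natSwap_fold (N p nn : Nat) (ring : List Int)
    (_hN : 0 < N) (hlen : ring.length = N) :
    pyRotate ring (p : Int) (nn : Int) =
      (List.range (nn / 2)).foldl (fun r k => natSwap' r ((p + k) % N) ((p + (nn - 1 - k)) % N)) ring := by
  unfold pyRotate
  simp only [PySem.List.len_eq, hlen]
  have hfd : PySem.Int.floordiv (nn : Int) 2 = ((nn / 2 : Nat) : Int) := by
    exact_mod_cast PySem.Int.floordiv_natCast nn 2
  rw [hfd, PySem.List.pyRange_zero_nat, List.foldl_map]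
  apply PySem.List.foldl_congr_mem'
  intro k hk r
  have hk2 : k < nn / 2 := List.mem_range.mp hk
  have hkn : k + 1 < nn := by omega
  have h1 : (p : Int) + (k : Int) = ((p + k : Nat) : Int) := by push_cast; ring
  have h2 : (p : Int) + (nn : Int) - 1 - (k : Int) = ((p + (nn - 1 - k) : Nat) : Int) := by
    push_cast; omega
  simp only [h1, h2, PySem.Int.mod_natCast, PySem.List.pyGetD_natCast, PySem.List.pySetD_natCast]
  rfl

-- B's swap loop as a fold of Nat-indexed swaps
lemma stepB_swapfold_eq (N nn : Nat) (y : List Int) (_hN : 0 < N) :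
    (PySem.List.pyRange 0 (PySem.Int.floordiv (nn : Int) 2) 1).foldl
      (fun r i =>
        let a := PySem.Int.mod i (N : Int)
        let b := PySem.Int.mod ((nn : Int) - 1 - i) (N : Int)
        let va := PySem.List.pyGetD r a 0
        let vb := PySem.List.pyGetD r b 0
        PySem.List.pySetD (PySem.List.pySetD r b va) a vb) y =
      (List.range (nn / 2)).foldl (fun r k => natSwap' r (k % N) ((nn - 1 - k) % N)) y := by
  have hfd : PySem.Int.floordiv (nn : Int) 2 = ((nn / 2 : Nat) : Int) := by
    exact_mod_cast PySem.Int.floordiv_natCast nn 2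
  rw [hfd, PySem.List.pyRange_zero_nat, List.foldl_map]
  apply PySem.List.foldl_congr_mem'
  intro k hk r
  have hk2 : k < nn / 2 := List.mem_range.mp hk
  have h2 : (nn : Int) - 1 - (k : Int) = ((nn - 1 - k : Nat) : Int) := by omega
  simp only [h2, PySem.Int.mod_natCast, PySem.List.pyGetD_natCast, PySem.List.pySetD_natCast]
  rfl

-- an empty swap loop for n ≤ 1 (including negative n)
lemma swapfold_nil_of_le_one (n : Int) (hn : n ≤ 1) :
    PySem.List.pyRange 0 (PySem.Int.floordiv n 2) 1 = [] := by
  apply PySem.List.pyRange_one_eq_nil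
  have h := (PySem.Int.floordiv_lt_iff_lt_mul (a := n) (b := 2) (q := 1) (by omega)).mpr (by omega)
  omega

-- one corresponding swap preserves the rotated-frame relation
lemma swap_rel (N p a b : Nat) (x y : List Int)
    (hN : 0 < N) (hp : p < N) (ha : a < N) (hb : b < N)
    (hx : x.length = N) (hy : y.length = N)
    (hrel : ∀ j, j < N → y[j]? = x[(p + j) % N]?) :
    ∀ j, j < N → (natSwap' y a b)[j]? = (natSwap' x ((p + a) % N) ((p + b) % N))[(p + j) % N]? := by
  intro j hj
  set s := (p + a) % N with hs
  set e := (p + b) % N with he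
  have hsN : s < N := Nat.mod_lt _ (by omega)
  have heN : e < N := Nat.mod_lt _ (by omega)
  have hjN : (p + j) % N < N := Nat.mod_lt _ (by omega)
  have hga : y.getD a 0 = (x[s]?).getD 0 := by
    rw [List.getD_eq_getElem?_getD, hrel a ha, hs]
  have hgb : y.getD b 0 = (x[e]?).getD 0 := by
    rw [List.getD_eq_getElem?_getD, hrel b hb, he]
  have hgs : x.getD s 0 = (x[s]?).getD 0 := List.getD_eq_getElem?_getD ..
  have hge : x.getD e 0 = (x[e]?).getD 0 := List.getD_eq_getElem?_getD ..
  unfold natSwap'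
  simp only [List.getElem?_set, List.length_set, hx, hy]
  simp only [if_pos ha, if_pos hb, if_pos hsN, if_pos heN]
  by_cases hja : a = j
  · have hsj : s = (p + j) % N := by rw [hs, hja]
    simp only [if_pos hja, if_pos hsj, hgb, hge]
  · have hsj : ¬ (s = (p + j) % N) := fun h => hja (pv_shift_inj N p a j hp ha hj (by rw [← hs, h]))
    simp only [if_neg hja, if_neg hsj]
    by_cases hjb : b = j
    · have hej : e = (p + j) % N := by rw [he, hjb]
      simp only [if_pos hjb, if_pos hej, hga, hgs]
    · have hej : ¬ (e = (p + j) % N) := fun h => hjb (pv_shift_inj N p b j hp hb hj (by rw [← he, h]))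
      simp only [if_neg hjb, if_neg hej]
      exact hrel j hj

-- the whole swap loops of A and B stay in the rotated-frame relation
lemma swapfold_rel (N p nn : Nat) (hN : 0 < N) (hp : p < N) :
    ∀ (K : Nat) (x y : List Int), x.length = N → y.length = N →
      (∀ j, j < N → y[j]? = x[(p + j) % N]?) →
      (((List.range K).foldl (fun r k => natSwap' r ((p + k) % N) ((p + (nn - 1 - k)) % N)) x).length = N ∧
       ((List.range K).foldl (fun r k => natSwap' r (k % N) ((nn - 1 - k) % N)) y).length = N ∧
       ∀ j, j < N →
         ((List.range K).foldl (fun r k => natSwap' r (k % N) ((nn - 1 - k) % N)) y)[j]? =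
         ((List.range K).foldl (fun r k => natSwap' r ((p + k) % N) ((p + (nn - 1 - k)) % N)) x)[(p + j) % N]?) := by
  intro K
  induction K with
  | zero => intro x y hx hy hrel; exact ⟨hx, hy, hrel⟩
  | succ K ih =>
    intro x y hx hy hrel
    obtain ⟨hxK, hyK, hrelK⟩ := ih x y hx hy hrel
    rw [List.range_succ]
    simp only [List.foldl_append, List.foldl_cons, List.foldl_nil]
    set xK := (List.range K).foldl (fun r k => natSwap' r ((p + k) % N) ((p + (nn - 1 - k)) % N)) x
    set yK := (List.range K).foldl (fun r k => natSwap' r (k % N) ((nn - 1 - k) % N)) y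
    refine ⟨by rw [length_natSwap']; exact hxK, by rw [length_natSwap']; exact hyK, ?_⟩
    have hmm : (p + K) % N = (p + K % N) % N := (Nat.add_mod_mod p K N).symm
    have hmm2 : (p + (nn - 1 - K)) % N = (p + (nn - 1 - K) % N) % N := (Nat.add_mod_mod p (nn - 1 - K) N).symm
    rw [hmm, hmm2]
    exact swap_rel N p (K % N) ((nn - 1 - K) % N) xK yK hN hp
      (Nat.mod_lt _ (by omega)) (Nat.mod_lt _ (by omega)) hxK hyK hrelK

-- drop/take rotation, pointwise
lemma rot_getElem? (y : List Int) (N rr j : Nat) (hlen : y.length = N) (hrr : rr ≤ N) (hj : j < N) :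
    (y.drop rr ++ y.take rr)[j]? = y[(j + rr) % N]? := by
  rcases Nat.lt_or_ge j (N - rr) with h | h
  · rw [List.getElem?_append_left (by simp [hlen]; omega), List.getElem?_drop]
    have : (j + rr) % N = rr + j := by rw [Nat.mod_eq_of_lt (by omega)]; omega
    rw [this]
  · rw [List.getElem?_append_right (by simp [hlen]; omega)]
    have h1 : (j + rr) % N = j + rr - N := by
      rw [Nat.mod_eq_sub_mod (by omega), Nat.mod_eq_of_lt (by omega)]
    rw [h1, List.getElem?_take_of_lt (by simp [hlen]; omega)]
    congr 1
    simp [hlen]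
    omega

lemma rotslice_len (y : List Int) (rr : Nat) :
    (PySem.List.slice y (some (rr : Int)) none ++ PySem.List.slice y none (some (rr : Int))).length = y.length := by
  rw [PySem.List.slice_from_natCast, PySem.List.slice_to_natCast]
  simp
  omega

-- simulation relation between A's state (ring, pos, skip) and B's state (ring, total, skip)
def pvInv (size : Int) (N : Nat) (a b : List Int × Int × Int) : Prop :=
  b.2.2 = a.2.2 ∧ a.1.length = N ∧ b.1.length = N ∧
  a.2.1 = PySem.Int.mod b.2.1 size ∧
  ∀ j, j < N → b.1[j]? = a.1[((a.2.1.toNat) + j) % N]?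

lemma pvInv_step (size : Int) (N : Nat) (hsz : size = (N : Int)) (hN : 0 < N)
    (a b : List Int × Int × Int) (n : Int)
    (h : pvInv size N a b) : pvInv size N (stepA size a n) (stepB size b n) := by
  obtain ⟨ringA, pos, skipA⟩ := a
  obtain ⟨ringB, total, skip⟩ := b
  obtain ⟨hskip, haLen, hbLen, hpos, hrel⟩ := h
  subst hskip
  simp only [pvInv] at *
  have hszpos : (0 : Int) < size := by rw [hsz]; exact_mod_cast hN
  have hpos0 : 0 ≤ pos := hpos ▸ PySem.Int.mod_nonneg _ hszpos
  have hposlt : pos < size := hpos ▸ PySem.Int.mod_lt _ hszpos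
  set p := pos.toNat with hp_def
  have hpcast : (p : Int) = pos := Int.toNat_of_nonneg hpos0
  have hpN : p < N := by omega
  set r := PySem.Int.mod (n + skip) size with hr_def
  have hr0 : 0 ≤ r := PySem.Int.mod_nonneg _ hszpos
  have hrlt : r < size := PySem.Int.mod_lt _ hszpos
  set rr := r.toNat with hrr_def
  have hrcast : (rr : Int) = r := Int.toNat_of_nonneg hr0
  have hrrN : rr ≤ N := by omega
  -- next positions agree
  have hmodeq : PySem.Int.mod (pos + n + skip) size = PySem.Int.mod (total + r) size := by
    rw [hpos, hr_def]
    rw [PySem.Int.mod_eq_emod_of_pos hszpos, PySem.Int.mod_eq_emod_of_pos hszpos,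
        PySem.Int.mod_eq_emod_of_pos hszpos, PySem.Int.mod_eq_emod_of_pos hszpos]
    conv_lhs => rw [add_assoc, Int.emod_add_emod]
    rw [Int.add_emod_emod]
  -- the rings after the (possibly empty) swap loops stay related
  have hcore :
      (if 1 < n then pyRotate ringA pos n else ringA).length = N ∧
      ((PySem.List.pyRange 0 (PySem.Int.floordiv n 2) 1).foldl
        (fun r i =>
          let a := PySem.Int.mod i size
          let b := PySem.Int.mod (n - 1 - i) size
          let va := PySem.List.pyGetD r a 0
          let vb := PySem.List.pyGetD r b 0
          PySem.List.pySetD (PySem.List.pySetD r b va) a vb) ringB).length = N ∧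
      ∀ j, j < N →
        ((PySem.List.pyRange 0 (PySem.Int.floordiv n 2) 1).foldl
          (fun r i =>
            let a := PySem.Int.mod i size
            let b := PySem.Int.mod (n - 1 - i) size
            let va := PySem.List.pyGetD r a 0
            let vb := PySem.List.pyGetD r b 0
            PySem.List.pySetD (PySem.List.pySetD r b va) a vb) ringB)[j]? =
        (if 1 < n then pyRotate ringA pos n else ringA)[(p + j) % N]? := by
    by_cases hg : 1 < n
    · set nn := n.toNat with hnn_def
      have hncast : (nn : Int) = n := Int.toNat_of_nonneg (by omega)
      rw [if_pos hg, ← hpcast, ← hncast, hsz]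
      rw [pyRotate_eq_natSwap_fold N p nn ringA hN haLen, stepB_swapfold_eq N nn ringB hN]
      exact swapfold_rel N p nn hN hpN (nn / 2) ringA ringB haLen hbLen hrel
    · rw [if_neg hg, swapfold_nil_of_le_one n (by omega)]
      exact ⟨haLen, hbLen, hrel⟩
  obtain ⟨hALen', hBLen', hrel'⟩ := hcore
  simp only [stepA, stepB]
  refine ⟨trivial, hALen', ?_, hmodeq, ?_⟩
  · rw [← hr_def, ← hrcast, rotslice_len]
    exact hBLen'
  · -- pointwise relation after B's left-rotation
    intro j hj
    have hp2 : (PySem.Int.mod (pos + n + skip) size).toNat = (p + rr) % N := by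
      have heq : PySem.Int.mod (pos + n + skip) size = (((p + rr) % N : Nat) : Int) := by
        rw [hmodeq, PySem.Int.mod_eq_emod_of_pos hszpos, ← hrcast, ← Int.emod_add_emod]
        rw [← PySem.Int.mod_eq_emod_of_pos hszpos (a := total), ← hpos, ← hpcast, hsz]
        norm_cast
      rw [heq, Int.toNat_natCast]
    rw [hp2, ← hr_def, ← hrcast, PySem.List.slice_from_natCast, PySem.List.slice_to_natCast]
    rw [rot_getElem? _ N rr j hBLen' hrrN hj]
    rw [hrel' ((j + rr) % N) (Nat.mod_lt _ (by omega))]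
    have hidx : (p + (j + rr) % N) % N = ((p + rr) % N + j) % N := by
      rw [Nat.add_mod_mod, Nat.mod_add_mod, show p + (j + rr) = p + rr + j by omega]
    rw [hidx]

lemma pvInv_fold (size : Int) (N : Nat) (hsz : size = (N : Int)) (hN : 0 < N) (items : List Int) :
    ∀ a b, pvInv size N a b → pvInv size N (items.foldl (stepA size) a) (items.foldl (stepB size) b) := by
  induction items with
  | nil => intro a b h; exact h
  | cons n t ih =>
    intro a b h
    exact ih _ _ (pvInv_step size N hsz hN a b n h)

lemma pvInv_outer (size : Int) (N : Nat) (hsz : size = (N : Int)) (hN : 0 < N)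
    (items : List Int) (l : List Int) :
    ∀ a b, pvInv size N a b →
      pvInv size N (l.foldl (fun st _ => items.foldl (stepA size) st) a)
                   (l.foldl (fun st _ => items.foldl (stepB size) st) b) := by
  induction l with
  | nil => intro a b h; exact h
  | cons x t ih => intro a b h; exact ih _ _ (pvInv_fold size N hsz hN items a b h)

-- ===== VERDICT (by name: the statement is the Claim_ definition above) =====
theorem knot_hash_spec : Claim_equal_knot_hash := by
  intro data size part hDom hPre
  unfold Spec_knot_hash
  unfold Pre_knot_hash at hPre
  obtain ⟨hszpos, hPre2⟩ := hPre
  set N := size.toNat with hN_def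
  have hsz : size = (N : Int) := by omega
  have hN : 0 < N := by omega
  simp only [knot_hash, knot_hash_alt]
  set ir : List Int × Int :=
    (if part = 1 then
      (((PySem.Str.split? data ",").getD []).map (fun x => (PySem.Int.ofStr? x).getD 0), 1)
    else
      (data.toList.map (fun c => (c.toNat : Int)) ++ [17, 31, 73, 47, 23], 64)) with hir
  set ring0 := PySem.List.pyRange 0 size 1 with hring0
  have hlen0 : ring0.length = N := by
    rw [hring0, PySem.List.length_pyRange_one]
    omega
  have hInv0 : pvInv size N (ring0, 0, 0) (ring0, 0, 0) := by
    refine ⟨rfl, hlen0, hlen0, ?_, ?_⟩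
    · rw [PySem.Int.mod_eq_emod_of_pos (by omega), Int.zero_emod]
    · intro j hj
      simp [Nat.mod_eq_of_lt hj]
  have hfin := pvInv_outer size N hsz hN ir.1 (PySem.List.pyRange 0 ir.2 1)
    (ring0, 0, 0) (ring0, 0, 0) hInv0
  set stA := (PySem.List.pyRange 0 ir.2 1).foldl (fun st _ => ir.1.foldl (stepA size) st) (ring0, 0, 0) with hstA
  set stB := (PySem.List.pyRange 0 ir.2 1).foldl (fun st _ => ir.1.foldl (stepB size) st) (ring0, 0, 0) with hstB
  obtain ⟨hsk, hlenA, hlenB, hposf, hrelf⟩ := hfin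
  set t := PySem.Int.mod stB.2.1 size with ht
  have ht0 : 0 ≤ t := PySem.Int.mod_nonneg _ (by omega)
  have htlt : t < size := PySem.Int.mod_lt _ (by omega)
  set tt := t.toNat with htt
  have httN : tt < N := by omega
  have hst : size - t = ((N - tt : Nat) : Int) := by omega
  rw [hst, PySem.List.slice_from_natCast, PySem.List.slice_to_natCast]
  apply List.ext_getElem?
  intro j
  by_cases hj : j < N
  · rw [rot_getElem? stB.1 N (N - tt) j hlenB (by omega) hj]
    rw [hrelf ((j + (N - tt)) % N) (Nat.mod_lt _ (by omega))]
    have hpA : stA.2.1.toNat = tt := by rw [hposf]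
    rw [hpA]
    have hidx : (tt + (j + (N - tt)) % N) % N = j := by
      rw [show j + (N - tt) = j + N - tt by omega]
      exact pv_pplus N tt j (by omega) hj
    rw [hidx]
  · rw [List.getElem?_eq_none (by omega), List.getElem?_eq_none (by simp [hlenB]; omega)]
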